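-- pv_equiv track=rewrite | github.com/Arsen1302/Code-copy-detector | TestData/solutions/problem_278_3.py | solution_278_3
-- ===== SOURCE A (Python) =====
-- from typing import List
--
-- def solution_278_3(nums: List[int]) -> int:
--     res = 0
--     tmp = 0
--
--     for num in nums:
--         if num == 0:
--             tmp = 0
--         else:
--             tmp += 1
--             res = max(res, tmp)
--
--     return res
-- ===== SOURCE B (Python) =====
-- from itertools import groupby
--
-- def solution_278_3(nums):
--     best = 0
--     for is_zero, group in groupby(nums, key=lambda x: x == 0):
--         if not is_zero:
--             best = max(best, len(list(group)))
--     return best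
-- ===== Notes on version B (the rewrite author's own statement) =====
-- stated objective: alternative
-- what changed: Replaces the running-counter scan with itertools.groupby: the list is partitioned into maximal zero/non-zero runs and the answer is the maximum length among the non-zero runs.
import Mathlib
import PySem

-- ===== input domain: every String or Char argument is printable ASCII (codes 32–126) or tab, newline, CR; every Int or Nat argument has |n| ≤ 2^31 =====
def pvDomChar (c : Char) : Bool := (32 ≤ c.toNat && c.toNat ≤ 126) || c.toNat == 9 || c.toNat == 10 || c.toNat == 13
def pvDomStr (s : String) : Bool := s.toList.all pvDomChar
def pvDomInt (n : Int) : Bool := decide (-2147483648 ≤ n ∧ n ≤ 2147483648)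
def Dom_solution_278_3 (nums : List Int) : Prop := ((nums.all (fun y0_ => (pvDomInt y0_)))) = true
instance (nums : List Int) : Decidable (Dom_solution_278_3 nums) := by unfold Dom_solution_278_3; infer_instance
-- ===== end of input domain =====

-- B replaces A's running-counter scan with a group-then-reduce shape (maximal runs via groupby); alternative decomposition, same cost.


-- ===== PORT A =====
-- loop body: if num == 0 then tmp = 0 else tmp += 1; res = max(res, tmp)
def pvStepA (st : Int × Int) (num : Int) : Int × Int :=
  if num = 0 then (st.1, 0) else (max st.1 (st.2 + 1), st.2 + 1)

def solution_278_3 (nums : List Int) : Int :=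
  (nums.foldl pvStepA (0, 0)).1

-- ===== PORT B =====
-- itertools.groupby(nums, key=lambda x: x == 0): list of (key, length of maximal run)
def pvGroups (l : List Int) : List (Bool × Int) :=
  match l with
  | [] => []
  | x :: xs =>
    let k := decide (x = 0)
    let g := xs.takeWhile (fun y => decide (y = 0) == k)
    (k, 1 + (g.length : Int)) :: pvGroups (xs.dropWhile (fun y => decide (y = 0) == k))
termination_by l.length
decreasing_by
  simp only [List.length_cons]
  exact Nat.lt_succ_of_le (List.length_dropWhile_le _ _)

def solution_278_3_alt (nums : List Int) : Int :=
  (pvGroups nums).foldl (fun best p => if p.1 then best else max best p.2) 0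

-- ===== PRECONDITION & SPEC =====
def Spec_solution_278_3 (nums : List Int) (out : Int) : Prop := out = solution_278_3_alt nums
instance (nums : List Int) (out : Int) : Decidable (Spec_solution_278_3 nums out) := by unfold Spec_solution_278_3; infer_instance

-- ===== CLAIM (what is proved, stated in full; the proofs are below) =====
def Claim_equal_solution_278_3 : Prop := ∀ (nums : List Int), Dom_solution_278_3 nums → Spec_solution_278_3 nums (solution_278_3 nums)

-- ===== LEMMAS AND PROOFS =====

-- A's res component only grows by max; hoist the initial res out of the fold.
theorem foldA_hoist (l : List Int) : ∀ (res tmp : Int), 0 ≤ res → 0 ≤ tmp →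
    (l.foldl pvStepA (res, tmp)).1 = max res (l.foldl pvStepA (0, tmp)).1 := by
  induction l with
  | nil => intro res tmp hr _; simp [max_eq_left hr]
  | cons x xs ih =>
    intro res tmp hr ht
    by_cases hx : x = 0
    · simp only [List.foldl_cons, pvStepA, if_pos hx]
      exact ih res 0 hr le_rfl
    · simp only [List.foldl_cons, pvStepA, if_neg hx]
      rw [ih (max res (tmp + 1)) (tmp + 1) (le_max_of_le_right (by omega)) (by omega),
          ih (max 0 (tmp + 1)) (tmp + 1) (le_max_left _ _) (by omega)]
      have h1 : max (0 : Int) (tmp + 1) = tmp + 1 := max_eq_right (by omega)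
      rw [h1]
      omega

-- fold over an all-nonzero run
theorem foldA_nonzero_run (g : List Int) : ∀ (res tmp : Int), (∀ y ∈ g, y ≠ 0) →
    g.foldl pvStepA (res, tmp) =
      (if g.isEmpty then res else max res (tmp + (g.length : Int)), tmp + (g.length : Int)) := by
  induction g with
  | nil => intro res tmp _; simp
  | cons x xs ih =>
    intro res tmp hnz
    have hx : x ≠ 0 := hnz x (List.mem_cons_self)
    simp only [List.foldl_cons, pvStepA, if_neg hx]
    rw [ih _ _ (fun y hy => hnz y (List.mem_cons_of_mem _ hy))]
    by_cases he : xs.isEmpty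
    · have : xs = [] := List.isEmpty_iff.mp he
      subst this; simp
    · simp only [List.isEmpty_cons, he, Bool.false_eq_true, if_false, List.length_cons,
        Prod.mk.injEq]
      have hlen : (0 : Int) ≤ (xs.length : Int) := Int.natCast_nonneg _
      have hmax : max (tmp + 1) (tmp + 1 + (xs.length : Int)) = tmp + 1 + (xs.length : Int) :=
        max_eq_right (by omega)
      rw [max_assoc, hmax]
      constructor
      · push_cast; ring_nf
      · push_cast; ring

-- a leading zero resets the state to (0,0) when res = 0
theorem foldA_zero_cons (t : List Int) (c : Int) :
    ((0 :: t).foldl pvStepA ((0 : Int), c)).1 = (t.foldl pvStepA ((0 : Int), (0 : Int))).1 := by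
  simp [pvStepA]

-- an all-zero prefix is ignored (starting from (0,0))
theorem foldA_zero_prefix (g : List Int) (rest : List Int) (hz : ∀ y ∈ g, y = 0) :
    ((g ++ rest).foldl pvStepA ((0 : Int), (0 : Int))).1
      = (rest.foldl pvStepA ((0 : Int), (0 : Int))).1 := by
  induction g with
  | nil => rfl
  | cons x xs ih =>
    have hx : x = 0 := hz x (List.mem_cons_self)
    subst hx
    rw [List.cons_append, foldA_zero_cons]
    exact ih (fun y hy => hz y (List.mem_cons_of_mem _ hy))

-- every group length recorded by pvGroups is nonnegative
theorem pvGroups_len_nonneg (l : List Int) : ∀ p ∈ pvGroups l, 0 ≤ p.2 := by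
  induction l using pvGroups.induct with
  | case1 => intro p hp; simp [pvGroups] at hp
  | case2 x xs k ih =>
    intro p hp
    rw [pvGroups] at hp
    simp only [List.mem_cons] at hp
    rcases hp with h | h
    · subst h
      have := Int.natCast_nonneg (xs.takeWhile (fun y => decide (y = 0) == k)).length
      simp; omega
    · exact ih p h

-- hoist the accumulator out of B's fold
theorem foldB_hoist (L : List (Bool × Int)) : ∀ (a : Int), 0 ≤ a → (∀ p ∈ L, 0 ≤ p.2) →
    L.foldl (fun best p => if p.1 then best else max best p.2) a
      = max a (L.foldl (fun best p => if p.1 then best else max best p.2) 0) := by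
  induction L with
  | nil => intro a ha _; simp [max_eq_left ha]
  | cons p L ih =>
    intro a ha hpos
    have hp2 : 0 ≤ p.2 := hpos p (List.mem_cons_self)
    have htl : ∀ q ∈ L, 0 ≤ q.2 := fun q hq => hpos q (List.mem_cons_of_mem _ hq)
    by_cases hk : p.1
    · simp only [List.foldl_cons, if_pos hk]
      exact ih a ha htl
    · simp only [List.foldl_cons, if_neg hk]
      rw [ih (max a p.2) (le_max_of_le_right hp2) htl,
          ih (max 0 p.2) (le_max_of_le_right hp2) htl]
      have : max (0 : Int) p.2 = p.2 := max_eq_right hp2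
      rw [this]
      omega

-- B-side: tail fold over a state (0, c) where the list is empty or starts with 0 equals the (0,0) fold
theorem foldA_reset (rest : List Int) (c : Int)
    (h : rest = [] ∨ ∃ t, rest = 0 :: t) :
    (rest.foldl pvStepA ((0 : Int), c)).1 = (rest.foldl pvStepA ((0 : Int), (0 : Int))).1 := by
  rcases h with h | ⟨t, h⟩ <;> subst h
  · rfl
  · rw [foldA_zero_cons]; simp [pvStepA]

-- dropWhile of a "same key" predicate yields [] or a list starting with the other key (here: nonzero run → rest starts with 0)
theorem dropWhile_head (xs : List Int) (p : Int → Bool) :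
    xs.dropWhile p = [] ∨ ∃ y t, xs.dropWhile p = y :: t ∧ p y = false := by
  cases h : xs.dropWhile p with
  | nil => exact Or.inl rfl
  | cons y t =>
    refine Or.inr ⟨y, t, rfl, ?_⟩
    have := List.head_dropWhile_not p (l := xs) (by simp [h])
    simpa [h] using this

-- main lemma: A's fold equals B's group-fold
theorem main_lemma (l : List Int) :
    (l.foldl pvStepA ((0 : Int), (0 : Int))).1 = solution_278_3_alt l := by
  induction l using pvGroups.induct with
  | case1 => simp [solution_278_3_alt, pvGroups]
  | case2 x xs k ih =>
    set g := xs.takeWhile (fun y => decide (y = 0) == k) with hgdef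
    set rest := xs.dropWhile (fun y => decide (y = 0) == k) with hrdef
    have hxs : xs = g ++ rest := (List.takeWhile_append_dropWhile ..).symm
    by_cases hx : x = 0
    · -- zero-led group: A skips it, B's fold keeps best = 0
      subst hx
      have hk : k = true := by simp [k]
      have hg : ∀ y ∈ g, y = 0 := by
        intro y hy
        have := List.mem_takeWhile_imp (l := xs) (hgdef ▸ hy)
        simp [hk] at this; exact this
      have hA : ((0 :: xs).foldl pvStepA ((0 : Int), (0 : Int))).1
          = (rest.foldl pvStepA ((0 : Int), (0 : Int))).1 := by
        rw [foldA_zero_cons]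
        conv_lhs => rw [hxs]
        exact foldA_zero_prefix g rest hg
      rw [hA, ih]
      unfold solution_278_3_alt
      conv_rhs => rw [pvGroups]
      rw [← hrdef]
      simp
    · -- nonzero-led group of length 1 + |g|
      have hk : k = false := by simp [k, hx]
      have hg : ∀ y ∈ (x :: g), y ≠ 0 := by
        intro y hy
        rcases List.mem_cons.mp hy with h | h
        · subst h; exact hx
        · have := List.mem_takeWhile_imp (l := xs) (hgdef ▸ h)
          simp [hk] at this; exact this
      have hrest : rest = [] ∨ ∃ t, rest = 0 :: t := by
        rcases dropWhile_head xs (fun y => decide (y = 0) == k) with h | ⟨y, t, h, hpy⟩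
        · exact Or.inl (hrdef ▸ h)
        · refine Or.inr ⟨t, ?_⟩
          simp [hk] at hpy
          rw [hrdef, h, hpy]
      have hlen : (0 : Int) ≤ (g.length : Int) := Int.natCast_nonneg _
      -- A side
      have hA : ((x :: xs).foldl pvStepA ((0 : Int), (0 : Int))).1
          = max (1 + (g.length : Int)) ((rest.foldl pvStepA ((0 : Int), (0 : Int))).1) := by
        have hsplit : (x :: xs) = (x :: g) ++ rest := by rw [hxs]; rfl
        rw [hsplit, List.foldl_append, foldA_nonzero_run (x :: g) 0 0 hg]
        simp only [List.isEmpty_cons, Bool.false_eq_true, if_false, List.length_cons]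
        have h0 : max (0 : Int) ((0 : Int) + ((g.length + 1 : Nat) : Int))
            = 1 + (g.length : Int) := by push_cast; omega
        have h1 : ((0 : Int) + ((g.length + 1 : Nat) : Int)) = 1 + (g.length : Int) := by
          push_cast; omega
        rw [h0, h1,
            foldA_hoist rest (1 + (g.length : Int)) (1 + (g.length : Int)) (by omega) (by omega),
            foldA_reset rest _ hrest]
      -- B side
      rw [hA, ih]
      unfold solution_278_3_alt
      conv_rhs => rw [pvGroups]
      rw [← hrdef, ← hgdef]
      simp only [List.foldl_cons]
      rw [if_neg (by simp [hx]), foldB_hoist (pvGroups rest) (max 0 (1 + (g.length : Int)))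
            (le_max_left _ _) (pvGroups_len_nonneg rest)]
      omega

-- ===== VERDICT (by name: the statement is the Claim_ definition above) =====
theorem solution_278_3_spec : Claim_equal_solution_278_3 := by
  intro nums _
  unfold Spec_solution_278_3 solution_278_3
  exact main_lemma nums
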